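-- pv_equiv track=rewrite | github.com/obn11/COSC | COSC261 Compilers/Assignment1 Alg.py | tupleise
-- ===== SOURCE A (Python) =====
-- def tupleise(value, items, i=0, tuplist=0):
--     """returns a list of tuples in the form (value, items[i])
--     where i is in range 0 to length items"""
--     if tuplist == 0:
--         tuplist = []
--     if i == len(items):
--         return tuplist
--     else:
--         tuplist.append((value, items[i]))
--         i += 1
--         return tupleise(value, items, i, tuplist)
-- ===== SOURCE B (Python) =====
-- def tupleise(value, items, i=0, tuplist=0):
--     """returns a list of tuples in the form (value, items[i])
--     where i is in range 0 to length items"""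
--     if tuplist == 0:
--         tuplist = []
--     tuplist.extend((value, items[j]) for j in range(i, len(items)))
--     return tuplist
-- ===== Notes on version B (the rewrite author's own statement) =====
-- stated objective: simpler
-- what changed: Replaces A's tail recursion (one Python call frame per element) with a single extend over range(i, len(items)), mutating the same accumulator list and honoring the tuplist==0 sentinel and the i offset.
-- outside the precondition, e.g. on tupleise(5, [1, 2], 2, 7): A returns 7, B raises AttributeError
import Mathlib
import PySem

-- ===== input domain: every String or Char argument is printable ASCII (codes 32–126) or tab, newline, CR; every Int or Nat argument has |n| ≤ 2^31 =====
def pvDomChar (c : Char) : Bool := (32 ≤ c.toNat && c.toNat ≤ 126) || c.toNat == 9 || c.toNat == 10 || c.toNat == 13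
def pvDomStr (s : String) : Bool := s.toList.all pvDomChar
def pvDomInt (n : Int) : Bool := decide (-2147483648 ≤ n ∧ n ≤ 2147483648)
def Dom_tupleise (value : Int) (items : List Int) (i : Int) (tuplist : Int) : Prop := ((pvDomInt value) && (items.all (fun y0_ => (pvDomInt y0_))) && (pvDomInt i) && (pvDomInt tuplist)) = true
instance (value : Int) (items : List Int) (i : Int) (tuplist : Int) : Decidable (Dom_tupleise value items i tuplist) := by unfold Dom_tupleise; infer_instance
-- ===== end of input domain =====

-- B replaces A's tail recursion with a single iterative extend over range(i, len(items)) on the same accumulator.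
-- Both A and B mutate the caller-supplied tuplist in place (when it is a list); the equivalence proved is about the return value.


-- ===== PORT A =====
-- the recursion after the sentinel has been replaced by a list; items[i] is pyGet?
-- (none = IndexError, outside Pre_, where the port just stops)
def tupleiseRec (value : Int) (items : List Int) (i : Int) (acc : List (Int × Int)) :
    List (Int × Int) :=
  if i = (items.length : Int) then acc
  else
    match h : PySem.List.pyGet? items i with
    | none => acc  -- Python raises IndexError here; excluded by Pre_
    | some x => tupleiseRec value items (i + 1) (acc ++ [(value, x)])
termination_by ((items.length : Int) - i).toNat
decreasing_by
  have : ¬ PySem.List.pyGet? items i = none := by simp [h]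
  rw [PySem.List.pyGet?_eq_none_iff] at this
  have := not_not.mp (by simpa using this)
  unfold PySem.Raise.InRange at this
  omega

def tupleise (value : Int) (items : List Int) (i : Int) (tuplist : Int) : List (Int × Int) :=
  if tuplist = 0 then tupleiseRec value items i []
  else []  -- Python's tuplist is then a non-zero int: A raises AttributeError or returns that int (not a list); outside Pre_

-- ===== PORT B =====
def tupleise_alt (value : Int) (items : List Int) (i : Int) (tuplist : Int) : List (Int × Int) :=
  if tuplist = 0 then
    (PySem.List.pyRange i (items.length : Int) 1).foldl
      (fun acc j =>  -- the generator body of B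
        match PySem.List.pyGet? items j with
        | none => acc  -- IndexError in B's generator; outside Pre_
        | some x => acc ++ [(value, x)]) []
  else []  -- tuplist a non-zero int: B's extend raises AttributeError; outside Pre_

-- ===== PRECONDITION & SPEC =====
-- Pre_ excludes tuplist ≠ 0 (A then raises AttributeError, or at i = len(items) returns the int
-- tuplist, which is not a list) and i outside [-len, len] (A raises IndexError).
def Pre_tupleise (value : Int) (items : List Int) (i : Int) (tuplist : Int) : Prop :=
  tuplist = 0 ∧ -(items.length : Int) ≤ i ∧ i ≤ (items.length : Int)
instance (value : Int) (items : List Int) (i : Int) (tuplist : Int) : Decidable (Pre_tupleise value items i tuplist) := by unfold Pre_tupleise; infer_instance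
def pvWitness_tupleise : Int × List Int × Int × Int := (7, [1, 2, 3], 1, 0)

def Spec_tupleise (value : Int) (items : List Int) (i : Int) (tuplist : Int) (out : List (Int × Int)) : Prop := out = tupleise_alt value items i tuplist
instance (value : Int) (items : List Int) (i : Int) (tuplist : Int) (out : List (Int × Int)) : Decidable (Spec_tupleise value items i tuplist out) := by unfold Spec_tupleise; infer_instance

-- ===== CLAIM (what is proved, stated in full; the proofs are below) =====
def Claim_equal_tupleise : Prop := ∀ (value : Int) (items : List Int) (i : Int) (tuplist : Int), Dom_tupleise value items i tuplist → Pre_tupleise value items i tuplist → Spec_tupleise value items i tuplist (tupleise value items i tuplist)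

-- ===== LEMMAS AND PROOFS =====

-- the loop body of B's port, named for the proofs
def tupStep (value : Int) (items : List Int) (acc : List (Int × Int)) (j : Int) :
    List (Int × Int) :=
  match PySem.List.pyGet? items j with
  | none => acc
  | some x => acc ++ [(value, x)]

theorem tupleiseRec_eq_foldl (value : Int) (items : List Int) :
    ∀ (i : Int) (acc : List (Int × Int)),
      -(items.length : Int) ≤ i → i ≤ (items.length : Int) →
      tupleiseRec value items i acc =
        (PySem.List.pyRange i (items.length : Int) 1).foldl (tupStep value items) acc := by
  intro i
  induction hn : ((items.length : Int) - i).toNat using Nat.strong_induction_on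
    generalizing i with
  | _ n ih =>
    intro acc hlo hhi
    by_cases hi : i = (items.length : Int)
    · subst hi
      rw [tupleiseRec, if_pos rfl, PySem.List.pyRange_one_eq_nil le_rfl]
      simp
    · have hlt : i < (items.length : Int) := lt_of_le_of_ne hhi hi
      have hir : PySem.Raise.InRange items.length i := by
        unfold PySem.Raise.InRange; omega
      have hsome : PySem.List.pyGet? items i ≠ none := by
        intro hnone
        rw [PySem.List.pyGet?_eq_none_iff] at hnone
        exact hnone hir
      rw [tupleiseRec, if_neg hi, PySem.List.pyRange_one_cons hlt, List.foldl_cons]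
      split
      · next hnone => exact absurd hnone hsome
      · next x hx =>
          have hstep : tupStep value items acc i = acc ++ [(value, x)] := by
            unfold tupStep; rw [hx]
          rw [hstep]
          exact ih (((items.length : Int) - (i + 1)).toNat) (by omega) (i + 1) rfl
            (acc ++ [(value, x)]) (by omega) (by omega)

-- ===== VERDICT (by name: the statement is the Claim_ definition above) =====
theorem tupleise_spec : Claim_equal_tupleise := by
  intro value items i tuplist _ hpre
  obtain ⟨ht, hlo, hhi⟩ := hpre
  unfold Spec_tupleise tupleise tupleise_alt
  subst ht
  rw [if_pos rfl, if_pos rfl]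
  rw [tupleiseRec_eq_foldl value items i [] hlo hhi]
  rfl
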